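-- pv_equiv track=rewrite | github.com/aajarven/adventofcode2023 | day02/main.py | minimum_bag_power
-- ===== SOURCE A (Python) =====
-- def minimum_bag_power(game):
--     """
--     Return the power of the smallest bag that allows the observed draws
--     """
--     minimum_bag = {}
--
--     for round_ in game:
--         for color, count in round_.items():
--             if color not in minimum_bag:
--                 minimum_bag[color] = count
--             elif minimum_bag[color] < count:
--                 minimum_bag[color] = count
--
--     product = 1
--     for count in minimum_bag.values():
--         product *= count
--     return product
-- ===== SOURCE B (Python) =====
-- def minimum_bag_power(game):
--     """
--     Return the power of the smallest bag that allows the observed draws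
--     """
--     colors = set()
--     for round_ in game:
--         colors.update(round_.keys())
--     product = 1
--     for color in colors:
--         product *= max(r[color] for r in game if color in r)
--     return product
-- ===== Notes on version B (the rewrite author's own statement) =====
-- stated objective: idiomatic
-- what changed: Inverts the loop nesting: instead of building a running max-dict in one pass over rounds, B first collects the color universe as a set and then, per color, takes the max over the rounds that mention it, multiplying the maxima.
import Mathlib
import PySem

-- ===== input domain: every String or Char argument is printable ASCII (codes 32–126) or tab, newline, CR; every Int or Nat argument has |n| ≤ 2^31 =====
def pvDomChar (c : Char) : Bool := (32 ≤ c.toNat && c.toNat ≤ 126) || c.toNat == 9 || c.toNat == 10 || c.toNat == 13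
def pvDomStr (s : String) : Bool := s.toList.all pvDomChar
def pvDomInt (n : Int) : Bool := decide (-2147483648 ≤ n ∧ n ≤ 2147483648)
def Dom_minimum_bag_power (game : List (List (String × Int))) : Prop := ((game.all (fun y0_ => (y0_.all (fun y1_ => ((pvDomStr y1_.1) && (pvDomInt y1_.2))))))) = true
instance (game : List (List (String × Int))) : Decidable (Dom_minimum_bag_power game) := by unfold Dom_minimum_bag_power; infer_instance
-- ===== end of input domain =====

-- B inverts A's loop nesting (color-set first, then a max per color) for a more idiomatic decomposition; same cost.
-- Each round arrives as an association list standing for a Python dict; per the convention the FIRST binding of a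
-- duplicated key wins, so both ports read rounds first-match (A via pvItems, B via a first-match lookup).


-- ===== PORT A =====
-- items of the Python dict a round's association list denotes (first binding per key wins)
def pvItems (r : List (String × Int)) : List (String × Int) :=
  r.foldl (fun acc p => if acc.any (fun q => q.1 == p.1) then acc else acc ++ [p]) []

-- body of A's inner loop: 'if color not in minimum_bag: …; elif minimum_bag[color] < count: …'
def pvStep (d : PySem.Dict String Int) (p : String × Int) : PySem.Dict String Int :=
  if !(d.contains p.1) then d.insert p.1 p.2
  else if d.getD p.1 0 < p.2 then d.insert p.1 p.2
  else d

def minimum_bag_power (game : List (List (String × Int))) : Int :=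
  let minimum_bag := game.foldl (fun d round_ => (pvItems round_).foldl pvStep d) PySem.Dict.empty
  minimum_bag.values.foldl (fun product count => product * count) 1

-- ===== PORT B =====
-- r[color] / 'color in r' on the dict a round denotes: first binding wins
def pvLookup? (r : List (String × Int)) (c : String) : Option Int :=
  (r.find? (fun p => p.1 == c)).map (fun p => p.2)

-- max(r[color] for r in game if color in r); the [] branch is unreachable (color comes from some round)
def pvMaxFor (game : List (List (String × Int))) (c : String) : Int :=
  match game.filterMap (fun r => pvLookup? r c) with
  | [] => 0
  | v :: vs => vs.foldl max v

def minimum_bag_power_alt (game : List (List (String × Int))) : Int :=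
  let colors : PySem.Set String :=
    game.foldl (fun s round_ => PySem.Set.update s (round_.map (fun p => p.1))) PySem.Set.empty
  colors.foldl (fun product color => product * pvMaxFor game color) 1

-- ===== PRECONDITION & SPEC =====
def Spec_minimum_bag_power (game : List (List (String × Int))) (out : Int) : Prop := out = minimum_bag_power_alt game
instance (game : List (List (String × Int))) (out : Int) : Decidable (Spec_minimum_bag_power game out) := by unfold Spec_minimum_bag_power; infer_instance

-- ===== CLAIM (what is proved, stated in full; the proofs are below) =====
def Claim_equal_minimum_bag_power : Prop := ∀ (game : List (List (String × Int))), Dom_minimum_bag_power game → Spec_minimum_bag_power game (minimum_bag_power game)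

-- ===== LEMMAS AND PROOFS =====

-- running max of an optional accumulator over a value list
def pvFoldMax (o : Option Int) (vs : List Int) : Option Int :=
  vs.foldl (fun o v => some (match o with | none => v | some a => max a v)) o

theorem pvFoldMax_cons (o : Option Int) (v : Int) (vs : List Int) :
    pvFoldMax o (v :: vs) = pvFoldMax (some (match o with | none => v | some a => max a v)) vs := rfl

theorem pvFoldMax_append (o : Option Int) (l₁ l₂ : List Int) :
    pvFoldMax (pvFoldMax o l₁) l₂ = pvFoldMax o (l₁ ++ l₂) := by
  simp [pvFoldMax, List.foldl_append]

theorem pvFoldMax_some (a : Int) (vs : List Int) :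
    pvFoldMax (some a) vs = some (vs.foldl max a) := by
  induction vs generalizing a with
  | nil => rfl
  | cons v vs ih => rw [pvFoldMax_cons]; exact ih (max a v)

-- keys of one pvStep
theorem keys_pvStep (d : PySem.Dict String Int) (p : String × Int) :
    (pvStep d p).keys = PySem.Set.add d.keys p.1 := by
  unfold pvStep
  by_cases h : d.contains p.1 = true
  · have hm : p.1 ∈ d.keys := (PySem.Dict.contains_iff_mem_keys d p.1).mp h
    rw [PySem.Set.add_of_mem hm]
    simp only [h, Bool.not_true, Bool.false_eq_true, if_false]
    split_ifs with h2
    · exact PySem.Dict.keys_insert_of_contains d p.2 h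
    · rfl
  · have hc : d.contains p.1 = false := by simpa using h
    have hm : p.1 ∉ d.keys := fun hmem => h ((PySem.Dict.contains_iff_mem_keys d p.1).mpr hmem)
    rw [PySem.Set.add_of_not_mem hm]
    simp only [hc, Bool.not_false, if_true]
    exact PySem.Dict.keys_insert_of_not_contains d p.2 hc

theorem nodup_keys_pvStep (d : PySem.Dict String Int) (p : String × Int)
    (h : d.keys.Nodup) : (pvStep d p).keys.Nodup := by
  unfold pvStep
  split_ifs <;> first | exact PySem.Dict.nodup_keys_insert _ _ _ h | exact h

-- get? through one pvStep
theorem get?_pvStep_self (d : PySem.Dict String Int) (p : String × Int) :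
    (pvStep d p).get? p.1 = some (match d.get? p.1 with | none => p.2 | some a => max a p.2) := by
  unfold pvStep
  cases hg : d.get? p.1 with
  | none =>
    have hc : d.contains p.1 = false := by rw [PySem.Dict.contains_eq_isSome_get?, hg]; rfl
    simp [hc, PySem.Dict.get?_insert_self]
  | some a =>
    have hc : d.contains p.1 = true := by rw [PySem.Dict.contains_eq_isSome_get?, hg]; rfl
    have hD : d.getD p.1 0 = a := PySem.Dict.getD_of_get?_eq_some d 0 hg
    simp only [hc, Bool.not_true, Bool.false_eq_true, if_false, hD]
    split_ifs with h2
    · rw [PySem.Dict.get?_insert_self]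
      exact congrArg some (max_eq_right h2.le).symm
    · rw [hg]
      exact congrArg some (max_eq_left (not_lt.mp h2)).symm

theorem get?_pvStep_of_ne (d : PySem.Dict String Int) (p : String × Int) (c : String)
    (h : c ≠ p.1) : (pvStep d p).get? c = d.get? c := by
  unfold pvStep
  split_ifs <;> first | exact PySem.Dict.get?_insert_of_ne d p.2 h | rfl

-- inner loop: get? after folding pvStep over a pair list
theorem get?_foldl_pvStep (l : List (String × Int)) (d : PySem.Dict String Int) (c : String) :
    ((l.foldl pvStep d).get? c)
      = pvFoldMax (d.get? c) ((l.filter (fun p => p.1 == c)).map (fun p => p.2)) := by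
  induction l generalizing d with
  | nil => rfl
  | cons p l ih =>
    rw [List.foldl_cons, ih]
    by_cases h : p.1 = c
    · subst h
      rw [List.filter_cons_of_pos (by simp), List.map_cons, pvFoldMax_cons, get?_pvStep_self]
    · rw [List.filter_cons_of_neg (by simp [h]), get?_pvStep_of_ne d p c (Ne.symm h)]

theorem keys_foldl_pvStep (l : List (String × Int)) (d : PySem.Dict String Int) :
    (l.foldl pvStep d).keys = PySem.Set.update d.keys (l.map (fun p => p.1)) := by
  induction l generalizing d with
  | nil => rw [List.foldl_nil, List.map_nil, PySem.Set.update_nil]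
  | cons p l ih =>
    rw [List.foldl_cons, ih, keys_pvStep, List.map_cons, PySem.Set.update_cons]

theorem nodup_keys_foldl_pvStep (l : List (String × Int)) (d : PySem.Dict String Int)
    (h : d.keys.Nodup) : (l.foldl pvStep d).keys.Nodup := by
  induction l generalizing d with
  | nil => exact h
  | cons p l ih => exact ih _ (nodup_keys_pvStep d p h)

-- pvItems' fold, generalized over the accumulator: the bindings of key c it keeps
theorem pvItems_aux_filter (r : List (String × Int)) (c : String) :
    ∀ acc : List (String × Int),
    ((r.foldl (fun acc p => if acc.any (fun q => q.1 == p.1) then acc else acc ++ [p]) acc).filter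
        (fun p => p.1 == c))
      = acc.filter (fun p => p.1 == c)
        ++ (if acc.any (fun p => p.1 == c) then [] else (r.find? (fun p => p.1 == c)).toList) := by
  induction r with
  | nil => intro acc; simp
  | cons p r ih =>
    intro acc
    rw [List.foldl_cons]
    by_cases hp : (acc.any (fun q => q.1 == p.1)) = true
    · rw [if_pos hp, ih]
      by_cases hc : p.1 = c
      · subst hc
        rw [if_pos hp, if_pos hp]
      · have hpc : ((fun q : String × Int => q.1 == c) p) ≠ true := by simp [hc]
        rw [List.find?_cons_of_neg (p := fun q : String × Int => q.1 == c) hpc]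
    · rw [if_neg hp, ih]
      by_cases hc : p.1 = c
      · subst hc
        have hanyf : acc.any (fun q => q.1 == p.1) = false := Bool.eq_false_iff.mpr hp
        rw [List.filter_append, List.any_append,
          List.find?_cons_of_pos (p := fun q : String × Int => q.1 == p.1) (by simp)]
        simp [hanyf]
      · have hpc : ((fun q : String × Int => q.1 == c) p) ≠ true := by simp [hc]
        rw [List.filter_append, List.any_append,
          List.find?_cons_of_neg (p := fun q : String × Int => q.1 == c) hpc]
        have hbeqf : (p.1 == c) = false := by simp [hc]
        have hfilt : List.filter (fun p : String × Int => p.1 == c) [p] = [] := by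
          simp [List.filter, hbeqf]
        have hany : List.any [p] (fun p : String × Int => p.1 == c) = false := by
          simp [hc]
        rw [hfilt, hany, List.append_nil, Bool.or_false]

theorem pvItems_filter (r : List (String × Int)) (c : String) :
    ((pvItems r).filter (fun p => p.1 == c)).map (fun p => p.2) = (pvLookup? r c).toList := by
  unfold pvItems pvLookup?
  rw [pvItems_aux_filter]
  simp only [List.filter_nil, List.any_nil, Bool.false_eq_true, if_false, List.nil_append]
  cases h : r.find? (fun p => p.1 == c) <;> simp

-- pvItems' fold, generalized over the accumulator: its keys are the running set of keys
theorem pvItems_aux_fst (r : List (String × Int)) :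
    ∀ acc : List (String × Int),
    ((r.foldl (fun acc p => if acc.any (fun q => q.1 == p.1) then acc else acc ++ [p]) acc).map
        (fun p => p.1))
      = (r.map (fun p => p.1)).foldl PySem.Set.add (acc.map (fun p => p.1)) := by
  induction r with
  | nil => intro acc; rfl
  | cons p r ih =>
    intro acc
    rw [List.foldl_cons, List.map_cons, List.foldl_cons, ih]
    have hb : (acc.any (fun q => q.1 == p.1) = true) ↔ p.1 ∈ acc.map (fun p => p.1) := by
      rw [List.any_eq_true]
      constructor
      · rintro ⟨q, hq, hbeq⟩
        exact List.mem_map.mpr ⟨q, hq, by simpa using hbeq⟩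
      · intro hm
        rcases List.mem_map.mp hm with ⟨q, hq, hfq⟩
        exact ⟨q, hq, by simp [hfq]⟩
    by_cases hm : p.1 ∈ acc.map (fun p => p.1)
    · rw [if_pos (hb.mpr hm), PySem.Set.add_of_mem hm]
    · rw [if_neg (fun h => hm (hb.mp h)), List.map_append,
        PySem.Set.add_of_not_mem hm]
      rfl

theorem map_fst_pvItems (r : List (String × Int)) :
    (pvItems r).map (fun p => p.1) = PySem.Set.ofList (r.map (fun p => p.1)) := by
  unfold pvItems
  rw [pvItems_aux_fst, PySem.Set.ofList_eq_foldl]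
  rfl

theorem set_update_ofList {α : Type} [BEq α] [LawfulBEq α] (s : PySem.Set α) (l : List α) :
    PySem.Set.update s (PySem.Set.ofList l) = PySem.Set.update s l := by
  rw [PySem.Set.update_eq_append_filter, PySem.Set.update_eq_append_filter, PySem.Set.ofList_ofList]

-- outer loop: keys evolve exactly like B's color set
theorem keys_outer (game : List (List (String × Int))) (d : PySem.Dict String Int) :
    (game.foldl (fun d round_ => (pvItems round_).foldl pvStep d) d).keys
      = game.foldl (fun s round_ => PySem.Set.update s (round_.map (fun p => p.1))) d.keys := by
  induction game generalizing d with
  | nil => rfl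
  | cons r game ih =>
    rw [List.foldl_cons, List.foldl_cons, ih, keys_foldl_pvStep, map_fst_pvItems, set_update_ofList]

-- outer loop: get? is the running max of all bindings of c
theorem get?_outer (game : List (List (String × Int))) (d : PySem.Dict String Int) (c : String) :
    (game.foldl (fun d round_ => (pvItems round_).foldl pvStep d) d).get? c
      = pvFoldMax (d.get? c) (game.filterMap (fun r => pvLookup? r c)) := by
  induction game generalizing d with
  | nil => rfl
  | cons r game ih =>
    rw [List.foldl_cons, ih, get?_foldl_pvStep, pvItems_filter, pvFoldMax_append,
      List.filterMap_cons]
    cases h : pvLookup? r c <;> simp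

theorem nodup_keys_outer (game : List (List (String × Int))) (d : PySem.Dict String Int)
    (h : d.keys.Nodup) :
    (game.foldl (fun d round_ => (pvItems round_).foldl pvStep d) d).keys.Nodup := by
  induction game generalizing d with
  | nil => exact h
  | cons r game ih => exact ih _ (nodup_keys_foldl_pvStep _ _ h)

-- every entry of A's final dict holds exactly B's per-color maximum
theorem items_value (game : List (List (String × Int))) (k : String) (v : Int)
    (hp : (k, v) ∈ (game.foldl (fun d round_ => (pvItems round_).foldl pvStep d)
        PySem.Dict.empty).items) :
    v = pvMaxFor game k := by
  have hnodup := nodup_keys_outer game PySem.Dict.empty PySem.Dict.nodup_keys_empty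
  have hg := PySem.Dict.get?_of_mem_items _ hp hnodup
  rw [get?_outer, PySem.Dict.get?_empty] at hg
  unfold pvMaxFor
  cases ho : game.filterMap (fun r => pvLookup? r k) with
  | nil => rw [ho] at hg; simp [pvFoldMax] at hg
  | cons w ws =>
    rw [ho, pvFoldMax_cons, pvFoldMax_some] at hg
    exact (Option.some.injEq _ _ ▸ hg).symm

-- ===== VERDICT (by name: the statement is the Claim_ definition above) =====
theorem minimum_bag_power_spec : Claim_equal_minimum_bag_power := by
  intro game _
  unfold Spec_minimum_bag_power
  simp only [minimum_bag_power, minimum_bag_power_alt]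
  have hkeys : (game.foldl (fun d round_ => (pvItems round_).foldl pvStep d)
        PySem.Dict.empty).keys
      = game.foldl (fun s round_ => PySem.Set.update s (round_.map (fun p => p.1)))
        PySem.Set.empty := by
    rw [keys_outer, PySem.Dict.keys_empty]; rfl
  rw [← hkeys]
  have hvals : (game.foldl (fun d round_ => (pvItems round_).foldl pvStep d)
        PySem.Dict.empty).values
      = (game.foldl (fun d round_ => (pvItems round_).foldl pvStep d)
        PySem.Dict.empty).keys.map (fun c => pvMaxFor game c) := by
    show List.map _ _ = List.map _ (List.map _ _)
    rw [List.map_map]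
    refine List.map_congr_left ?_
    intro p hp
    exact items_value game p.1 p.2 (by exact hp)
  rw [hvals, List.foldl_map]
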